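-- pv_equiv track=rewrite | github.com/evitenic/t9-converter | helpers/t9_mapper.py | convert_text_to_t9
-- ===== SOURCE A (Python) =====
-- T9_KEY_MAPPING = {
--     '2': ['a', 'b', 'c'],
--     '3': ['d', 'e', 'f'],
--     '4': ['g', 'h', 'i'],
--     '5': ['j', 'k', 'l'],
--     '6': ['m', 'n', 'o'],
--     '7': ['p', 'q', 'r', 's'],
--     '8': ['t', 'u', 'v'],
--     '9': ['w', 'x', 'y', 'z'],
--     '0': [' ']
-- }
--
-- def convert_text_to_t9(text: str) -> str:
--     """Convert text to t9
--
--     Args: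
--         text (str): plain text
--
--     Returns:
--         str: t9 text
--     """
--
--     result = []
--
--     for character in text.lower():
--         for key, letters in T9_KEY_MAPPING.items():
--             if character in letters:
--                 position = letters.index(character) + 1
--                 if key == '0':
--                     result.append(f"{key}")
--                 else:
--                     result.append(f"{key}{position}")
--
--     return ','.join(result)
-- ===== SOURCE B (Python) =====
-- def _code(c):
--     """Closed-form T9 code of a character, by arithmetic on its code point.
--
--     Letters split into keypad groups of 3, with 's' and 'z' as the fourth
--     letters of keys 7 and 9; no mapping table is consulted.
--     """
--     if c == ' ':
--         return '0'
--     if 'a' <= c <= 'z':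
--         i = ord(c) - 97
--         if i < 18:
--             return f"{2 + i // 3}{i % 3 + 1}"
--         if i == 18:
--             return "74"
--         if i < 25:
--             j = i - 19
--             return f"{8 + j // 3}{j % 3 + 1}"
--         return "94"
--     return None
--
--
-- def convert_text_to_t9(text: str) -> str:
--     """Convert text to t9: one pass, arithmetic code per character."""
--     return ','.join(code for code in map(_code, text.lower()) if code is not None)
-- ===== Notes on version B (the rewrite author's own statement) =====
-- stated objective: faster
-- what changed: Replaces A's table-driven inner scan over all nine key/letters lists (membership test plus list.index per character) by a closed-form arithmetic computation of each character's code directly from its code point (groups of three with 's' and 'z' as fourth letters), using no mapping table at all.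
import Mathlib
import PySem

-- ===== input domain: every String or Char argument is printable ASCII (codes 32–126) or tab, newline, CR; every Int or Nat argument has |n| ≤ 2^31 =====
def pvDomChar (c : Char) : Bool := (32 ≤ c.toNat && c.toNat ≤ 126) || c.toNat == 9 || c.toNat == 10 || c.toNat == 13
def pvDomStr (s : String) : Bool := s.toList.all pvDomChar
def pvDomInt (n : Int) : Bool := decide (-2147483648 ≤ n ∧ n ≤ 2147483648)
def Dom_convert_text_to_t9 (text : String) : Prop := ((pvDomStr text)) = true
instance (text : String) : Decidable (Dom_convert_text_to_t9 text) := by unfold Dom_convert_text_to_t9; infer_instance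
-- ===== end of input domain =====

-- B drops A's mapping table and inner scan entirely: each character's code is computed
-- in closed form by arithmetic on its code point (objective: alternative algorithm).

-- ===== PORT A =====
def t9KeyMapping : List (List Char × List Char) :=
  [(['2'], ['a','b','c']), (['3'], ['d','e','f']), (['4'], ['g','h','i']),
   (['5'], ['j','k','l']), (['6'], ['m','n','o']), (['7'], ['p','q','r','s']),
   (['8'], ['t','u','v']), (['9'], ['w','x','y','z']), (['0'], [' '])]

def convert_text_to_t9 (text : String) : String :=
  let result : List (List Char) :=
    (PySem.Str.lower text).toList.foldl (fun result character =>
      t9KeyMapping.foldl (fun result kl =>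
        if character ∈ kl.2 then
          let position : Int := (((PySem.List.index? kl.2 character).getD 0 : Nat) : Int) + 1
          if kl.1 = ['0'] then result ++ [kl.1]
          else result ++ [kl.1 ++ PySem.Int.toChars position]
        else result) result) []
  String.ofList (PySem.Chars.join [','] result)

-- ===== PORT B =====
-- closed-form code of a character (Source B's _code), by arithmetic on the code point
def t9Code (c : Char) : Option (List Char) :=
  if c = ' ' then some ['0']
  else if 'a' ≤ c ∧ c ≤ 'z' then
    let i : Nat := c.toNat - 97
    if i < 18 then some [Char.ofNat (50 + i / 3), Char.ofNat (49 + i % 3)]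
    else if i = 18 then some ['7','4']
    else if i < 25 then
      let j : Nat := i - 19
      some [Char.ofNat (56 + j / 3), Char.ofNat (49 + j % 3)]
    else some ['9','4']
  else none

def convert_text_to_t9_alt (text : String) : String :=
  String.ofList (PySem.Chars.join [','] ((PySem.Str.lower text).toList.filterMap t9Code))

-- ===== PRECONDITION & SPEC =====
def Spec_convert_text_to_t9 (text : String) (out : String) : Prop := out = convert_text_to_t9_alt text
instance (text : String) (out : String) : Decidable (Spec_convert_text_to_t9 text out) := by unfold Spec_convert_text_to_t9; infer_instance

-- ===== CLAIM (what is proved, stated in full; the proofs are below) =====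
def Claim_equal_convert_text_to_t9 : Prop := ∀ (text : String), Dom_convert_text_to_t9 text → Spec_convert_text_to_t9 text (convert_text_to_t9 text)

-- ===== LEMMAS AND PROOFS =====

-- the per-character contribution of A's inner scan, as a flatMap body
def perA (c : Char) : List (List Char) :=
  t9KeyMapping.flatMap (fun kl =>
    if c ∈ kl.2 then
      [if kl.1 = ['0'] then kl.1
       else kl.1 ++ PySem.Int.toChars ((((PySem.List.index? kl.2 c).getD 0 : Nat) : Int) + 1)]
    else [])

lemma inner_eq (res : List (List Char)) (c : Char) :
    t9KeyMapping.foldl (fun result kl =>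
      if c ∈ kl.2 then
        let position : Int := (((PySem.List.index? kl.2 c).getD 0 : Nat) : Int) + 1
        if kl.1 = ['0'] then result ++ [kl.1]
        else result ++ [kl.1 ++ PySem.Int.toChars position]
      else result) res = res ++ perA c := by
  rw [show (fun (result : List (List Char)) (kl : List Char × List Char) =>
      if c ∈ kl.2 then
        let position : Int := (((PySem.List.index? kl.2 c).getD 0 : Nat) : Int) + 1
        if kl.1 = ['0'] then result ++ [kl.1]
        else result ++ [kl.1 ++ PySem.Int.toChars position]
      else result)
    = (fun result kl => result ++
        (if c ∈ kl.2 then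
          [if kl.1 = ['0'] then kl.1
           else kl.1 ++ PySem.Int.toChars ((((PySem.List.index? kl.2 c).getD 0 : Nat) : Int) + 1)]
         else [])) from funext fun res => funext fun kl => by split_ifs <;> simp]
  exact PySem.List.foldl_append_eq_flatMap _ _ _

lemma char_toNat_inj {c d : Char} (h : c.toNat = d.toNat) : c = d :=
  Char.ext (UInt32.toNat_inj.mp h)

lemma perA_eq_code (c : Char) : perA c = (t9Code c).toList := by
  by_cases h0 : c = 'a'
  · subst h0; decide
  by_cases h1 : c = 'b'
  · subst h1; decide
  by_cases h2 : c = 'c'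
  · subst h2; decide
  by_cases h3 : c = 'd'
  · subst h3; decide
  by_cases h4 : c = 'e'
  · subst h4; decide
  by_cases h5 : c = 'f'
  · subst h5; decide
  by_cases h6 : c = 'g'
  · subst h6; decide
  by_cases h7 : c = 'h'
  · subst h7; decide
  by_cases h8 : c = 'i'
  · subst h8; decide
  by_cases h9 : c = 'j'
  · subst h9; decide
  by_cases h10 : c = 'k'
  · subst h10; decide
  by_cases h11 : c = 'l'
  · subst h11; decide
  by_cases h12 : c = 'm'
  · subst h12; decide
  by_cases h13 : c = 'n'
  · subst h13; decide
  by_cases h14 : c = 'o'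
  · subst h14; decide
  by_cases h15 : c = 'p'
  · subst h15; decide
  by_cases h16 : c = 'q'
  · subst h16; decide
  by_cases h17 : c = 'r'
  · subst h17; decide
  by_cases h18 : c = 's'
  · subst h18; decide
  by_cases h19 : c = 't'
  · subst h19; decide
  by_cases h20 : c = 'u'
  · subst h20; decide
  by_cases h21 : c = 'v'
  · subst h21; decide
  by_cases h22 : c = 'w'
  · subst h22; decide
  by_cases h23 : c = 'x'
  · subst h23; decide
  by_cases h24 : c = 'y'
  · subst h24; decide
  by_cases h25 : c = 'z'
  · subst h25; decide
  by_cases h26 : c = ' '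
  · subst h26; decide
  have hr : ¬('a' ≤ c ∧ c ≤ 'z') := by
    rintro ⟨ha, hb⟩
    have ha' : (97 : Nat) ≤ c.toNat := ha
    have hb' : c.toNat ≤ 122 := hb
    have n0 : c.toNat ≠ 97 := fun h => h0 (char_toNat_inj h)
    have n1 : c.toNat ≠ 98 := fun h => h1 (char_toNat_inj h)
    have n2 : c.toNat ≠ 99 := fun h => h2 (char_toNat_inj h)
    have n3 : c.toNat ≠ 100 := fun h => h3 (char_toNat_inj h)
    have n4 : c.toNat ≠ 101 := fun h => h4 (char_toNat_inj h)
    have n5 : c.toNat ≠ 102 := fun h => h5 (char_toNat_inj h)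
    have n6 : c.toNat ≠ 103 := fun h => h6 (char_toNat_inj h)
    have n7 : c.toNat ≠ 104 := fun h => h7 (char_toNat_inj h)
    have n8 : c.toNat ≠ 105 := fun h => h8 (char_toNat_inj h)
    have n9 : c.toNat ≠ 106 := fun h => h9 (char_toNat_inj h)
    have n10 : c.toNat ≠ 107 := fun h => h10 (char_toNat_inj h)
    have n11 : c.toNat ≠ 108 := fun h => h11 (char_toNat_inj h)
    have n12 : c.toNat ≠ 109 := fun h => h12 (char_toNat_inj h)
    have n13 : c.toNat ≠ 110 := fun h => h13 (char_toNat_inj h)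
    have n14 : c.toNat ≠ 111 := fun h => h14 (char_toNat_inj h)
    have n15 : c.toNat ≠ 112 := fun h => h15 (char_toNat_inj h)
    have n16 : c.toNat ≠ 113 := fun h => h16 (char_toNat_inj h)
    have n17 : c.toNat ≠ 114 := fun h => h17 (char_toNat_inj h)
    have n18 : c.toNat ≠ 115 := fun h => h18 (char_toNat_inj h)
    have n19 : c.toNat ≠ 116 := fun h => h19 (char_toNat_inj h)
    have n20 : c.toNat ≠ 117 := fun h => h20 (char_toNat_inj h)
    have n21 : c.toNat ≠ 118 := fun h => h21 (char_toNat_inj h)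
    have n22 : c.toNat ≠ 119 := fun h => h22 (char_toNat_inj h)
    have n23 : c.toNat ≠ 120 := fun h => h23 (char_toNat_inj h)
    have n24 : c.toNat ≠ 121 := fun h => h24 (char_toNat_inj h)
    have n25 : c.toNat ≠ 122 := fun h => h25 (char_toNat_inj h)
    omega
  simp [perA, t9KeyMapping, t9Code, hr, h0, h1, h2, h3, h4, h5, h6, h7, h8, h9, h10,
    h11, h12, h13, h14, h15, h16, h17, h18, h19, h20, h21, h22, h23, h24, h25, h26]

lemma flatMap_toList_eq_filterMap (l : List Char) (g : Char → Option (List Char)) :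
    l.flatMap (fun c => (g c).toList) = l.filterMap g := by
  induction l with
  | nil => rfl
  | cons x xs ih => cases h : g x <;> simp [List.flatMap_cons, h, ih]

-- ===== VERDICT (by name: the statement is the Claim_ definition above) =====
theorem convert_text_to_t9_spec : Claim_equal_convert_text_to_t9 := by
  intro text _
  unfold Spec_convert_text_to_t9 convert_text_to_t9 convert_text_to_t9_alt
  have houter : (PySem.Str.lower text).toList.foldl (fun result character =>
      t9KeyMapping.foldl (fun result kl =>
        if character ∈ kl.2 then
          let position : Int := (((PySem.List.index? kl.2 character).getD 0 : Nat) : Int) + 1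
          if kl.1 = ['0'] then result ++ [kl.1]
          else result ++ [kl.1 ++ PySem.Int.toChars position]
        else result) result) ([] : List (List Char))
      = (PySem.Str.lower text).toList.flatMap perA := by
    rw [show (fun (result : List (List Char)) (character : Char) =>
        t9KeyMapping.foldl (fun result kl =>
          if character ∈ kl.2 then
            let position : Int := (((PySem.List.index? kl.2 character).getD 0 : Nat) : Int) + 1
            if kl.1 = ['0'] then result ++ [kl.1]
            else result ++ [kl.1 ++ PySem.Int.toChars position]
          else result) result)
      = (fun result character => result ++ perA character)
      from funext fun res => funext fun c => inner_eq res c]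
    exact PySem.List.foldl_append_eq_flatMap _ _ _
  simp only [houter]
  rw [show (PySem.Str.lower text).toList.flatMap perA
      = (PySem.Str.lower text).toList.filterMap t9Code from by
    rw [← flatMap_toList_eq_filterMap]
    exact List.flatMap_congr (fun c _ => perA_eq_code c)]
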